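-- pv_equiv track=rewrite | github.com/CantBeSubh/ProgrammingProjects | Placement/Array/28AriveDepart.py | func
-- ===== SOURCE A (Python) =====
-- def func(arr,dep):
--     n=len(arr)
--     p=1
--     for i in range(1,n):
--         j=0
--         while(j<n-1):
--             j+=1
--             if(dep[j]>arr[i]):
--                 if arr[i]>arr[j]:
--                     p+=1
--
--     return p
-- ===== SOURCE B (Python) =====
-- def func(arr, dep):
--     # Sort the candidate values arr[1:] once; for each j count the values
--     # strictly between arr[j] and dep[j] with two hand-written binary searches.
--     n = len(arr)
--     vals = sorted(arr[1:])
--     m = len(vals)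
--     p = 1
--     for j in range(1, n):
--         a = arr[j]
--         d = dep[j]
--         # bisect_left(vals, d)
--         lo, hi = 0, m
--         while lo < hi:
--             mid = (lo + hi) // 2
--             if vals[mid] < d:
--                 lo = mid + 1
--             else:
--                 hi = mid
--         left = lo
--         # bisect_right(vals, a)
--         lo, hi = 0, m
--         while lo < hi:
--             mid = (lo + hi) // 2
--             if a < vals[mid]:
--                 hi = mid
--             else:
--                 lo = mid + 1
--         cnt = left - lo
--         if cnt > 0:
--             p += cnt
--     return p
-- ===== Notes on version B (the rewrite author's own statement) =====
-- stated objective: faster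
-- what changed: Replaced the nested O(n^2) index loops by sorting arr[1:] once and, for each j, counting the arr-values strictly between arr[j] and dep[j] with two hand-written binary searches.
import Mathlib
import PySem

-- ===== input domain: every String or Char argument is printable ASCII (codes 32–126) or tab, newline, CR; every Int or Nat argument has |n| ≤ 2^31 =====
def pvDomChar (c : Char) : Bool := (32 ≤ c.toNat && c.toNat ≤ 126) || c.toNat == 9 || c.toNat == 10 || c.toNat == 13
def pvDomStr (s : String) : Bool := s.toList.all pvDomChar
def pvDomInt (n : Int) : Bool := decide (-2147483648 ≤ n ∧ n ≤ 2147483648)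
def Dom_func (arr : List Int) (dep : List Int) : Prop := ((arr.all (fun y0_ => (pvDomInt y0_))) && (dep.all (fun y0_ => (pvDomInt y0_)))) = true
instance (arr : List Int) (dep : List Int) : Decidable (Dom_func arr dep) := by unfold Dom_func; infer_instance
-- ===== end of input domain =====

-- B replaces A's nested O(n^2) index loops by sorting arr[1:] once and counting, for each j,
-- the arr-values strictly between arr[j] and dep[j] with two binary searches (objective: faster).

-- ===== PORT A =====
def func (arr : List Int) (dep : List Int) : Int :=
  let n : Int := arr.length
  (PySem.List.pyRange 1 n 1).foldl (fun p i =>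
    -- inner 'while j < n-1: j += 1; …' visits exactly j = 1 … n-1
    (PySem.List.pyRange 1 n 1).foldl (fun p j =>
      if PySem.List.pyGetD dep j 0 > PySem.List.pyGetD arr i 0 then
        if PySem.List.pyGetD arr i 0 > PySem.List.pyGetD arr j 0 then p + 1 else p
      else p) p) 1

-- ===== PORT B =====
-- Source B's hand-written lo/hi binary-search loops are exactly PySem.List.bisectLeft / bisectRight
-- (the same while-loop on (lo, hi) with mid = (lo+hi)//2).
def func_alt (arr : List Int) (dep : List Int) : Int :=
  let n : Int := arr.length
  let vals := PySem.List.sorted (PySem.List.slice arr (some 1) none) (fun x => x) false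
  (PySem.List.pyRange 1 n 1).foldl (fun p j =>
    let a := PySem.List.pyGetD arr j 0
    let d := PySem.List.pyGetD dep j 0
    let cnt : Int := (PySem.List.bisectLeft vals d : Int) - (PySem.List.bisectRight vals a : Int)
    if cnt > 0 then p + cnt else p) 1

-- ===== PRECONDITION & SPEC =====
-- A raises IndexError (dep[j] for j up to len(arr)-1) when len(arr) ≥ 2 and len(dep) < len(arr).
def Pre_func (arr : List Int) (dep : List Int) : Prop :=
  arr.length ≤ 1 ∨ arr.length ≤ dep.length
instance (arr : List Int) (dep : List Int) : Decidable (Pre_func arr dep) := by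
  unfold Pre_func; infer_instance
def pvWitness_func : List Int × List Int := ([1, 4, 2], [3, 5, 6])

def Spec_func (arr : List Int) (dep : List Int) (out : Int) : Prop := out = func_alt arr dep
instance (arr : List Int) (dep : List Int) (out : Int) : Decidable (Spec_func arr dep out) := by
  unfold Spec_func; infer_instance

-- ===== CLAIM (what is proved, stated in full; the proofs are below) =====
def Claim_equal_func : Prop := ∀ (arr : List Int) (dep : List Int), Dom_func arr dep → Pre_func arr dep → Spec_func arr dep (func arr dep)

-- ===== LEMMAS AND PROOFS =====

-- nested-if counting loop = start + countP
theorem pv_foldl_if_if {α : Type} (P Q : α → Prop) [DecidablePred P] [DecidablePred Q]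
    (l : List α) (a : Int) :
    l.foldl (fun acc x => if P x then if Q x then acc + 1 else acc else acc) a
      = a + (l.countP (fun x => decide (P x ∧ Q x)) : Int) := by
  induction l generalizing a with
  | nil => simp
  | cons x t ih =>
    simp only [List.foldl_cons, List.countP_cons]
    by_cases h1 : P x <;> by_cases h2 : Q x <;>
      simp [h1, h2, ih] <;> omega

-- a prefix-characterised predicate on a list has countP = the prefix length
theorem pv_countP_eq_of_prefix {α : Type} (p : α → Bool) :
    ∀ (s : List α) (r : Nat), r ≤ s.length →
      (∀ (j : Nat) (hj : j < s.length), (p s[j] = true ↔ j < r)) → s.countP p = r := by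
  intro s
  induction s with
  | nil => intro r hr _; simp at hr ⊢; omega
  | cons x t ih =>
    intro r hr h
    have hx := h 0 (by simp)
    cases r with
    | zero =>
      have hpx : ¬ p x = true := by simpa using hx
      have ht : t.countP p = 0 := by
        refine ih 0 (Nat.zero_le _) ?_
        intro j hj
        simpa using h (j+1) (by simpa using Nat.succ_lt_succ hj)
      simp [hpx, ht]
    | succ r' =>
      have hpx : p x = true := hx.mpr (Nat.succ_pos _)
      have ht : t.countP p = r' := by
        refine ih r' (by simpa using hr) ?_
        intro j hj
        have := h (j+1) (by simpa using Nat.succ_lt_succ hj)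
        simpa [Nat.succ_lt_succ_iff] using this
      simp [hpx, ht]

theorem pv_bisectLeft_eq_countP (s : List Int) (hs : s.Pairwise (· ≤ ·)) (d : Int) :
    PySem.List.bisectLeft s d = s.countP (fun v => decide (v < d)) := by
  obtain ⟨h1, h2, h3⟩ := PySem.List.bisectLeft_spec s d hs
  refine (pv_countP_eq_of_prefix _ s _ h1 ?_).symm
  intro j hj
  constructor
  · intro hp
    by_contra hlt
    exact absurd (h3 j hj (Nat.le_of_not_lt hlt)) (by simpa using hp)
  · intro hlt; simpa using h2 j hj hlt

theorem pv_bisectRight_eq_countP (s : List Int) (hs : s.Pairwise (· ≤ ·)) (a : Int) :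
    PySem.List.bisectRight s a = s.countP (fun v => decide (v ≤ a)) := by
  obtain ⟨h1, h2, h3⟩ := PySem.List.bisectRight_spec s a hs
  refine (pv_countP_eq_of_prefix _ s _ h1 ?_).symm
  intro j hj
  constructor
  · intro hp
    by_contra hlt
    exact absurd (h3 j hj (Nat.le_of_not_lt hlt)) (by simpa using hp)
  · intro hlt; simpa using h2 j hj hlt

theorem pv_countP_split (s : List Int) (a d : Int) (had : a < d) :
    s.countP (fun v => decide (v < d))
      = s.countP (fun v => decide (v ≤ a)) + s.countP (fun v => decide (a < v) && decide (v < d)) := by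
  induction s with
  | nil => simp
  | cons x t ih =>
    simp only [List.countP_cons, ih]
    by_cases h1 : x < d <;> by_cases h2 : x ≤ a <;> by_cases h3 : a < x <;>
      simp [h1, h2, h3] <;> omega

-- B's per-element branch produces exactly the strictly-between count
theorem pv_contrib (s : List Int) (hs : s.Pairwise (· ≤ ·)) (a d p : Int) :
    (if ((PySem.List.bisectLeft s d : Int) - (PySem.List.bisectRight s a : Int)) > 0
       then p + ((PySem.List.bisectLeft s d : Int) - (PySem.List.bisectRight s a : Int)) else p)
      = p + (s.countP (fun v => decide (a < v) && decide (v < d)) : Int) := by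
  rw [pv_bisectLeft_eq_countP s hs d, pv_bisectRight_eq_countP s hs a]
  by_cases had : a < d
  · rw [pv_countP_split s a d had]
    split_ifs with h <;> push_cast <;> omega
  · have hz : s.countP (fun v => decide (a < v) && decide (v < d)) = 0 := by
      rw [List.countP_eq_zero]
      intro v _; simp; intro hav; omega
    have hle : s.countP (fun v => decide (v < d)) ≤ s.countP (fun v => decide (v ≤ a)) := by
      refine List.countP_mono_left ?_
      intro v _ hv; simp at hv ⊢; omega
    split_ifs with h
    · exfalso; omega
    · rw [hz]; simp

theorem pv_cast_countP {α : Type} (q : α → Bool) (l : List α) :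
    (l.countP q : Int) = (l.map (fun x => if q x then (1:Int) else 0)).sum :=
  (PySem.List.sum_map_ite_one_zero q l).symm

-- double list-sum swap
theorem pv_sum_swap {α β : Type} (l : List α) (m : List β) (g : α → β → Int) :
    (l.map (fun i => (m.map (g i)).sum)).sum
      = (m.map (fun j => (l.map (fun i => g i j)).sum)).sum := by
  induction l with
  | nil => simp
  | cons x t ih =>
    simp only [List.map_cons, List.sum_cons, ih]
    rw [PySem.List.sum_map_add_int m (g x) (fun j => (t.map (fun i => g i j)).sum)]

-- the 0/1 indicator of the pair condition arr[j] < arr[i] < dep[j]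
def pvG (arr dep : List Int) (i j : Int) : Int :=
  if (PySem.List.pyGetD arr j 0 < PySem.List.pyGetD arr i 0 ∧
      PySem.List.pyGetD arr i 0 < PySem.List.pyGetD dep j 0) then 1 else 0

theorem pv_funcA_eq (arr dep : List Int) :
    func arr dep =
      1 + ((PySem.List.pyRange 1 (arr.length : Int) 1).map (fun i =>
            ((PySem.List.pyRange 1 (arr.length : Int) 1).map (fun j => pvG arr dep i j)).sum)).sum := by
  have hinner : ∀ (p i : Int),
      (PySem.List.pyRange 1 (arr.length : Int) 1).foldl (fun p j =>
        if PySem.List.pyGetD dep j 0 > PySem.List.pyGetD arr i 0 then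
          if PySem.List.pyGetD arr i 0 > PySem.List.pyGetD arr j 0 then p + 1 else p
        else p) p
      = p + ((PySem.List.pyRange 1 (arr.length : Int) 1).map (fun j => pvG arr dep i j)).sum := by
    intro p i
    rw [pv_foldl_if_if (fun j => PySem.List.pyGetD dep j 0 > PySem.List.pyGetD arr i 0)
          (fun j => PySem.List.pyGetD arr i 0 > PySem.List.pyGetD arr j 0)]
    rw [pv_cast_countP]
    have hm := List.map_congr_left (l := PySem.List.pyRange 1 (arr.length : Int) 1)
      (f := fun j => if (decide (PySem.List.pyGetD dep j 0 > PySem.List.pyGetD arr i 0 ∧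
                                 PySem.List.pyGetD arr i 0 > PySem.List.pyGetD arr j 0)) then (1:Int) else 0)
      (g := fun j => pvG arr dep i j) ?_
    · rw [hm]
    intro j _
    by_cases h1 : PySem.List.pyGetD arr j 0 < PySem.List.pyGetD arr i 0 <;>
      by_cases h2 : PySem.List.pyGetD arr i 0 < PySem.List.pyGetD dep j 0 <;>
        simp [pvG, h1, h2]
  show (PySem.List.pyRange 1 (arr.length : Int) 1).foldl _ 1 = _
  simp only [hinner]
  rw [PySem.List.foldl_add]

theorem pv_funcB_eq (arr dep : List Int) :
    func_alt arr dep =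
      1 + ((PySem.List.pyRange 1 (arr.length : Int) 1).map (fun j =>
            ((PySem.List.pyRange 1 (arr.length : Int) 1).map (fun i => pvG arr dep i j)).sum)).sum := by
  have hs : (PySem.List.sorted (PySem.List.slice arr (some 1) none) (fun x => x) false).Pairwise
      (fun a b => a ≤ b) := PySem.List.sorted_pairwise _ _
  have hbody : ∀ (p j : Int),
      (if ((PySem.List.bisectLeft (PySem.List.sorted (PySem.List.slice arr (some 1) none) (fun x => x) false) (PySem.List.pyGetD dep j 0) : Int)
            - (PySem.List.bisectRight (PySem.List.sorted (PySem.List.slice arr (some 1) none) (fun x => x) false) (PySem.List.pyGetD arr j 0) : Int)) > 0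
        then p + ((PySem.List.bisectLeft (PySem.List.sorted (PySem.List.slice arr (some 1) none) (fun x => x) false) (PySem.List.pyGetD dep j 0) : Int)
            - (PySem.List.bisectRight (PySem.List.sorted (PySem.List.slice arr (some 1) none) (fun x => x) false) (PySem.List.pyGetD arr j 0) : Int))
        else p)
      = p + ((PySem.List.pyRange 1 (arr.length : Int) 1).map (fun i => pvG arr dep i j)).sum := by
    intro p j
    rw [pv_contrib _ hs (PySem.List.pyGetD arr j 0) (PySem.List.pyGetD dep j 0) p]
    congr 1
    -- countP over the sorted slice = countP over arr.tail = indicator sum over the index range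
    rw [List.Perm.countP_eq _ (PySem.List.sorted_perm _ _ _)]
    rw [PySem.List.slice_from_one]
    have hmap : (PySem.List.pyRange 1 (arr.length : Int) 1).map (fun i => PySem.List.pyGetD arr i 0)
        = arr.tail := by
      have := PySem.List.map_pyGetD_pyRange' arr 0 (a := 1) (by norm_num)
      simpa [List.drop_one] using this
    rw [← hmap, List.countP_map, pv_cast_countP]
    have hm := List.map_congr_left (l := PySem.List.pyRange 1 (arr.length : Int) 1)
      (f := fun i => if (((fun v => decide (PySem.List.pyGetD arr j 0 < v) && decide (v < PySem.List.pyGetD dep j 0)) ∘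
                          (fun i => PySem.List.pyGetD arr i 0)) i) then (1:Int) else 0)
      (g := fun i => pvG arr dep i j) ?_
    · rw [hm]
    intro i _
    by_cases h1 : PySem.List.pyGetD arr j 0 < PySem.List.pyGetD arr i 0 <;>
      by_cases h2 : PySem.List.pyGetD arr i 0 < PySem.List.pyGetD dep j 0 <;>
        simp [pvG, Function.comp, h1, h2]
  show (PySem.List.pyRange 1 (arr.length : Int) 1).foldl _ 1 = _
  simp only [hbody]
  rw [PySem.List.foldl_add]

-- ===== VERDICT (by name: the statement is the Claim_ definition above) =====
theorem func_spec : Claim_equal_func := by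
  intro arr dep _ _
  unfold Spec_func
  rw [pv_funcA_eq, pv_funcB_eq, pv_sum_swap]
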